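-- pv_equiv track=rewrite | github.com/harshvardhan2804/Python_Experiments | Experiment-5/splitTwoString/main.py | create_strings
-- ===== SOURCE A (Python) =====
-- def create_strings(string):
--     char_count = {}
--     first_string = ""
--     second_string = ""
--
--     for char in string:
--         if char in char_count:
--             char_count[char] += 1
--         else:
--             char_count[char] = 1
--
--     for char in string:
--         if char_count[char] == 1:
--             first_string += char
--         else:
--             second_string += char
--
--     return (first_string, second_string)
-- ===== SOURCE B (Python) =====
-- def create_strings(string):
--     # Sort the characters; a character is repeated iff it appears in two
--     # adjacent positions of the sorted sequence.
--     chars = sorted(string)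
--     dups = {a for a, b in zip(chars, chars[1:]) if a == b}
--     first = []
--     second = []
--     for c in string:
--         if c in dups:
--             second.append(c)
--         else:
--             first.append(c)
--     return ("".join(first), "".join(second))
-- ===== Notes on version B (the rewrite author's own statement) =====
-- stated objective: alternative
-- what changed: Replaces frequency counting entirely: B sorts the characters, detects repeated characters as adjacent equal pairs of the sorted sequence (a set of duplicated chars), then splits the string in one pass by membership in that set.
import Mathlib
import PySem

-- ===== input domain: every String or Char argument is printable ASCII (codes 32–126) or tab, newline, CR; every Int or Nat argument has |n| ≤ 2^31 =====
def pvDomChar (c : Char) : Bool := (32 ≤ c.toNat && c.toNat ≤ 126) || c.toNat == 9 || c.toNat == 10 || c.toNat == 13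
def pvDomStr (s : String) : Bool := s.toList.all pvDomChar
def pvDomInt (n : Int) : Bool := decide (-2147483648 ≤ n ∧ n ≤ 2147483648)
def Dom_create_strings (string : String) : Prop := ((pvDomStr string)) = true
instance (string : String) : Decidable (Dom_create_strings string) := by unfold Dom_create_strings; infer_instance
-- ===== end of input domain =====

-- B replaces A's frequency counting by sort-and-scan: repeated characters are found as
-- adjacent equal pairs of the sorted character sequence (alternative algorithm, not faster).

-- ===== PORT A =====
def create_strings (string : String) : String × String :=
  -- first loop: build char_count
  let char_count : PySem.Dict Char Int :=
    string.toList.foldl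
      (fun d c => if d.contains c then d.modify c 0 (· + 1) else d.insert c 1)
      PySem.Dict.empty
  -- second loop: split by count
  let p : List Char × List Char :=
    string.toList.foldl
      (fun p c => if char_count.getD c 0 = 1 then (p.1 ++ [c], p.2) else (p.1, p.2 ++ [c]))
      ([], [])
  (String.ofList p.1, String.ofList p.2)

-- ===== PORT B =====
def create_strings_alt (string : String) : String × String :=
  let chars : List Char := PySem.List.sorted string.toList (fun c => c) false
  let dups : PySem.Set Char :=
    PySem.Set.ofList (((chars.zip chars.tail).filter (fun p => decide (p.1 = p.2))).map Prod.fst)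
  let p : List Char × List Char :=
    string.toList.foldl
      (fun p c => if dups.contains c then (p.1, p.2 ++ [c]) else (p.1 ++ [c], p.2))
      ([], [])
  (String.ofList p.1, String.ofList p.2)

-- ===== PRECONDITION & SPEC =====
def Spec_create_strings (string : String) (out : String × String) : Prop := out = create_strings_alt string
instance (string : String) (out : String × String) : Decidable (Spec_create_strings string out) := by unfold Spec_create_strings; infer_instance

-- ===== CLAIM (what is proved, stated in full; the proofs are below) =====
def Claim_equal_create_strings : Prop := ∀ (string : String), Dom_create_strings string → Spec_create_strings string (create_strings string)

-- ===== LEMMAS AND PROOFS =====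

-- A's branching counter loop computes the list count (its membership branch is exactly modify/insert).
theorem getD_count_loop (l : List Char) (d : PySem.Dict Char Int) (v : Char) :
    (l.foldl (fun d c => if d.contains c then d.modify c 0 (· + 1) else d.insert c 1) d).getD v 0
      = d.getD v 0 + l.count v := by
  induction l generalizing d with
  | nil => simp
  | cons c t ih =>
    simp only [List.foldl_cons, ih]
    by_cases hc : d.contains c
    · rw [if_pos hc, PySem.Dict.getD_modify]
      by_cases hv : v = c
      · subst hv; rw [if_pos rfl, List.count_cons_self]; push_cast; ring
      · rw [if_neg hv]; simp [Ne.symm hv]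
    · rw [if_neg hc, PySem.Dict.getD_insert]
      by_cases hv : v = c
      · subst hv
        rw [if_pos rfl, List.count_cons_self,
          PySem.Dict.getD_of_not_contains d 0 (by simpa using hc)]
        push_cast; ring
      · rw [if_neg hv]; simp [Ne.symm hv]

-- A splitting loop with a pointwise condition is two filters (f-branch appends to the first slot).
theorem split_loop (l : List Char) (f : Char → Prop) [DecidablePred f] (a b : List Char) :
    (l.foldl (fun p c => if f c then (p.1 ++ [c], p.2) else (p.1, p.2 ++ [c])) (a, b))
      = (a ++ l.filter (fun c => decide (f c)), b ++ l.filter (fun c => !decide (f c))) := by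
  induction l generalizing a b with
  | nil => simp
  | cons c t ih =>
    by_cases hc : f c <;> simp [hc, ih]

-- In an ≤-sorted char list, a char occurs at least twice iff it heads an adjacent equal pair.
theorem mem_adjdups_iff (l : List Char) (h : l.Pairwise (· ≤ ·)) (c : Char) :
    c ∈ ((l.zip l.tail).filter (fun p => decide (p.1 = p.2))).map Prod.fst
      ↔ 2 ≤ l.count c := by
  induction l with
  | nil => simp
  | cons a t ih =>
    cases t with
    | nil =>
      have hle : List.count c [a] ≤ [a].length := List.count_le_length
      simp only [List.length_cons, List.length_nil] at hle
      simp only [List.tail_cons, List.zip_nil_right, List.filter_nil, List.map_nil,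
        List.not_mem_nil, false_iff]
      omega
    | cons b t' =>
      have hab : a ≤ b := (List.pairwise_cons.mp h).1 b (by simp)
      have ht : (b :: t').Pairwise (· ≤ ·) := (List.pairwise_cons.mp h).2
      have iht := ih ht
      have hsplit : List.count c (a :: b :: t')
          = List.count c (b :: t') + (if a = c then 1 else 0) := by
        simp [List.count_cons]
      simp only [List.tail_cons] at iht ⊢
      rw [List.zip_cons_cons, List.filter_cons]
      by_cases hb : a = b
      · rw [if_pos (by simpa using hb)]
        simp only [List.map_cons, List.mem_cons]
        rw [iht]
        constructor
        · rintro (rfl | h2)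
          · subst hb
            rw [hsplit, if_pos rfl]
            have h1 : 1 ≤ List.count c (c :: t') :=
              List.one_le_count_iff.mpr (by simp)
            omega
          · rw [hsplit]; omega
        · intro h2
          by_cases hca : c = a
          · exact Or.inl hca
          · refine Or.inr ?_
            rw [hsplit, if_neg (fun hh => hca hh.symm)] at h2
            omega
      · rw [if_neg (by simpa using hb)]
        rw [iht]
        by_cases hca : c = a
        · subst hca
          have hnot : c ∉ b :: t' := by
            intro hmem
            rcases List.mem_cons.mp hmem with h1 | h1
            · exact hb h1
            · exact hb (le_antisymm hab ((List.pairwise_cons.mp ht).1 c h1))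
          have h0 : List.count c (b :: t') = 0 := List.count_eq_zero.mpr hnot
          rw [hsplit, h0, if_pos rfl]
          constructor <;> intro hh <;> omega
        · rw [hsplit, if_neg (fun hh => hca hh.symm)]
          omega

-- ===== VERDICT (by name: the statement is the Claim_ definition above) =====
theorem create_strings_spec : Claim_equal_create_strings := by
  intro s _
  unfold Spec_create_strings
  simp only [create_strings, create_strings_alt]
  set l := s.toList with hl
  set chars := PySem.List.sorted l (fun c => c) false with hchars
  set dups : PySem.Set Char :=
    PySem.Set.ofList (((chars.zip chars.tail).filter (fun p => decide (p.1 = p.2))).map Prod.fst)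
    with hdups
  -- B's split with swapped branches, rewritten through split_loop on ¬contains
  have hsplitB :
      (l.foldl (fun p c => if dups.contains c then (p.1, p.2 ++ [c]) else (p.1 ++ [c], p.2))
          (([] : List Char), ([] : List Char)))
        = ([] ++ l.filter (fun c => decide (¬ dups.contains c = true)),
           [] ++ l.filter (fun c => !decide (¬ dups.contains c = true))) := by
    rw [← split_loop l (fun c => ¬ dups.contains c = true) [] []]
    apply PySem.List.foldl_congr_mem
    intro p c _
    by_cases hc : dups.contains c = true
    · simp
    · simp
  have hcond : ∀ c ∈ l,
      ((l.foldl (fun d c => if d.contains c then d.modify c 0 (· + 1) else d.insert c 1)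
          (PySem.Dict.empty : PySem.Dict Char Int)).getD c 0 = 1)
        ↔ (¬ dups.contains c = true) := by
    intro c hcmem
    rw [getD_count_loop]
    simp only [PySem.Dict.getD_empty, zero_add]
    have hmemdup : dups.contains c = true ↔ 2 ≤ l.count c := by
      rw [hdups]
      have hperm := PySem.List.sorted_perm l (fun c => c) false
      have hsorted : chars.Pairwise (· ≤ ·) := by
        simpa using PySem.List.sorted_pairwise l (fun c => c)
      rw [PySem.Set.contains_iff, PySem.Set.mem_ofList,
        mem_adjdups_iff chars hsorted c, hchars, hperm.count_eq]
    have hge1 : 1 ≤ l.count c := List.one_le_count_iff.mpr hcmem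
    rw [hmemdup]
    constructor
    · intro h1 h2
      have : l.count c = 1 := by exact_mod_cast h1
      omega
    · intro h2
      have : l.count c = 1 := by omega
      exact_mod_cast congrArg (Nat.cast : Nat → Int) this
  have hf1 : l.filter
        (fun c => decide ((l.foldl (fun d c => if d.contains c then d.modify c 0 (· + 1) else d.insert c 1)
          (PySem.Dict.empty : PySem.Dict Char Int)).getD c 0 = 1))
      = l.filter (fun c => decide (¬ dups.contains c = true)) := by
    apply List.filter_congr
    intro c hc
    simp only [decide_eq_decide]
    exact hcond c hc
  have hf2 : l.filter
        (fun c => !decide ((l.foldl (fun d c => if d.contains c then d.modify c 0 (· + 1) else d.insert c 1)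
          (PySem.Dict.empty : PySem.Dict Char Int)).getD c 0 = 1))
      = l.filter (fun c => !decide (¬ dups.contains c = true)) := by
    apply List.filter_congr
    intro c hc
    have := hcond c hc
    simp only [Bool.not_inj_iff, decide_eq_decide]
    exact this
  rw [split_loop, hsplitB, hf1, hf2]
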